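-- pv_equiv track=rewrite | github.com/mormor-karl/Detecting-PIIs-in-Swedish-Learner-Essays | analyze_output.py | split_tags_and_tokens
-- ===== SOURCE A (Python) =====
-- def split_tags_and_tokens(input: list):
--     '''A function that splits every entry in a list by whitespace and into two separate lists.
--
--     Args:
--         input (list): A list where every entry is a string containing whitespace.
--
--     Returns:
--         Two lists of lists, containing the first and the second element of every entry from the original list, split by samples.
--     '''
--     tokens = []
--     tags = []
--
--     temp_token = []
--     temp_tag = []
--
--     for line in input:
--         if len(line.strip()) > 1:
--             token = line.strip().split()[0]
--             tag = ' '.join(line.strip().split()[1:])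
--
--             temp_token.append(token)
--             temp_tag.append(tag)
--
--         else:  # if it's a break
--             tokens.append(temp_token)
--             tags.append(temp_tag)
--             # reset
--             temp_token = []
--             temp_tag = []
--
--     return tokens, tags
-- ===== SOURCE B (Python) =====
-- def split_tags_and_tokens(input: list):
--     """Index-based re-implementation: find break positions, slice the input
--     into groups between them (trailing lines after the last break are dropped,
--     as in the original), then map each group to its tokens and tags."""
--     breaks = [i for i, line in enumerate(input) if len(line.strip()) <= 1]
--     groups = [input[p + 1:b] for p, b in zip([-1] + breaks, breaks)]
--     tokens = [[line.strip().split()[0] for line in g] for g in groups]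
--     tags = [[' '.join(line.strip().split()[1:]) for line in g] for g in groups]
--     return tokens, tags
-- ===== Notes on version B (the rewrite author's own statement) =====
-- stated objective: alternative
-- what changed: Replaces the single fused accumulator loop (flushing temp lists on each break) with an index-based decomposition: first compute the list of break positions, then slice the input into groups between consecutive breaks, then map each group to its tokens and tags.
import Mathlib
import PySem

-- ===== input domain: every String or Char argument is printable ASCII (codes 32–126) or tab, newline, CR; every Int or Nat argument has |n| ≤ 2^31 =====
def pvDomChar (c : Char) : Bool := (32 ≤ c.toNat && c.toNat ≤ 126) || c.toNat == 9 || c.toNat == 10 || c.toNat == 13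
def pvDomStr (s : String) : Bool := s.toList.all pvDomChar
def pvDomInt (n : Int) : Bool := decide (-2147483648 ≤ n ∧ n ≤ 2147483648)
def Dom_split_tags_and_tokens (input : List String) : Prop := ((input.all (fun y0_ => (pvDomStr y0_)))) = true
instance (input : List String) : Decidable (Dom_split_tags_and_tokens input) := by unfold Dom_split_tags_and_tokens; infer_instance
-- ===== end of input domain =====

-- B replaces A's fused accumulator loop by break-position indexing + slicing; same return value; no argument is mutated.

-- ===== PORT A =====
-- token = line.strip().split()[0]  (the branch guard 1 < len(line.strip()) guarantees
-- the word list is nonempty, so the .getD default is never reached)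
def pvTokOf (line : String) : String :=
  (PySem.List.pyGet? (PySem.Str.split₀ (PySem.Str.strip line)) 0).getD ""

-- tag = ' '.join(line.strip().split()[1:])
def pvTagOf (line : String) : String :=
  PySem.Str.join " " (PySem.List.slice (PySem.Str.split₀ (PySem.Str.strip line)) (some 1) none)

def split_tags_and_tokens (input : List String) : List (List String) × List (List String) :=
  let r := input.foldl
    (fun (st : (List (List String) × List (List String)) × (List String × List String)) line =>
      if 1 < PySem.Str.len (PySem.Str.strip line) then
        (st.1, (st.2.1 ++ [pvTokOf line], st.2.2 ++ [pvTagOf line]))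
      else
        ((st.1.1 ++ [st.2.1], st.1.2 ++ [st.2.2]), ([], [])))
    (([], []), ([], []))
  r.1

-- ===== PORT B =====
def split_tags_and_tokens_alt (input : List String) : List (List String) × List (List String) :=
  -- breaks = [i for i, line in enumerate(input) if len(line.strip()) <= 1]
  let breaks : List Int :=
    ((PySem.List.enumerate input 0).filter
      (fun p => decide (PySem.Str.len (PySem.Str.strip p.2) ≤ 1))).map (·.1)
  -- groups = [input[p + 1:b] for p, b in zip([-1] + breaks, breaks)]
  let groups : List (List String) :=
    (List.zip ((-1 : Int) :: breaks) breaks).map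
      (fun p => PySem.List.slice input (some (p.1 + 1)) (some p.2))
  (groups.map (fun g => g.map pvTokOf), groups.map (fun g => g.map pvTagOf))

-- ===== PRECONDITION & SPEC =====
def Spec_split_tags_and_tokens (input : List String) (out : List (List String) × List (List String)) : Prop := out = split_tags_and_tokens_alt input
instance (input : List String) (out : List (List String) × List (List String)) : Decidable (Spec_split_tags_and_tokens input out) := by unfold Spec_split_tags_and_tokens; infer_instance

-- ===== CLAIM (what is proved, stated in full; the proofs are below) =====
def Claim_equal_split_tags_and_tokens : Prop := ∀ (input : List String), Dom_split_tags_and_tokens input → Spec_split_tags_and_tokens input (split_tags_and_tokens input)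

-- ===== LEMMAS AND PROOFS =====

-- The maximal runs of content lines, each run closed off by a break line
-- (the trailing unterminated run is dropped): common functional description.
def pvRuns (acc : List String) : List String → List (List String)
  | [] => []
  | l :: ls =>
      if 1 < PySem.Str.len (PySem.Str.strip l) then pvRuns (acc ++ [l]) ls
      else acc :: pvRuns [] ls

-- break positions, as natural-number indices from 0
def pvBk : List String → List Nat
  | [] => []
  | l :: ls =>
      if 1 < PySem.Str.len (PySem.Str.strip l) then (pvBk ls).map (· + 1)
      else 0 :: (pvBk ls).map (· + 1)

-- shift a list of Nat indices into Int by an offset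
def pvSh (o : Int) (ks : List Nat) : List Int := ks.map (fun (k : Nat) => (k : Int) + o)

theorem pvSh_nil (o : Int) : pvSh o [] = [] := rfl

theorem pvSh_cons (o : Int) (k : Nat) (ks : List Nat) :
    pvSh o (k :: ks) = ((k : Int) + o) :: pvSh o ks := rfl

theorem pvSh_shift (o : Int) (ks : List Nat) :
    pvSh o (ks.map (· + 1)) = pvSh (o + 1) ks := by
  unfold pvSh
  rw [List.map_map]
  apply List.map_congr_left
  intro k _
  simp only [Function.comp_apply]
  push_cast
  ring

theorem pvFoldA_char (ls : List String) :
    ∀ (T G : List (List String)) (acc : List String),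
    (ls.foldl
      (fun (st : (List (List String) × List (List String)) × (List String × List String)) line =>
        if 1 < PySem.Str.len (PySem.Str.strip line) then
          (st.1, (st.2.1 ++ [pvTokOf line], st.2.2 ++ [pvTagOf line]))
        else
          ((st.1.1 ++ [st.2.1], st.1.2 ++ [st.2.2]), ([], [])))
      ((T, G), (acc.map pvTokOf, acc.map pvTagOf))).1
    = (T ++ (pvRuns acc ls).map (fun g => g.map pvTokOf),
       G ++ (pvRuns acc ls).map (fun g => g.map pvTagOf)) := by
  induction ls with
  | nil => intro T G acc; simp [pvRuns]
  | cons l ls ih =>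
      intro T G acc
      rw [List.foldl_cons]
      by_cases h : 1 < PySem.Str.len (PySem.Str.strip l)
      · rw [if_pos h]
        simp only [pvRuns, if_pos h]
        have H := ih T G (acc ++ [l])
        simp only [List.map_append, List.map_cons, List.map_nil] at H
        exact H
      · rw [if_neg h]
        simp only [pvRuns, if_neg h]
        have H := ih (T ++ [acc.map pvTokOf]) (G ++ [acc.map pvTagOf]) []
        simp only [List.map_nil] at H
        rw [H]
        simp [List.append_assoc]

theorem pvBreaks_char (ls : List String) :
    ∀ (s : Int),
    ((PySem.List.enumerate ls s).filter
      (fun p => decide (PySem.Str.len (PySem.Str.strip p.2) ≤ 1))).map (·.1)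
    = pvSh s (pvBk ls) := by
  induction ls with
  | nil => intro s; simp [PySem.List.enumerate_nil, pvBk, pvSh_nil]
  | cons l ls ih =>
      intro s
      rw [PySem.List.enumerate_cons, List.filter_cons]
      by_cases h : 1 < PySem.Str.len (PySem.Str.strip l)
      · have hb : ¬ PySem.Str.len (PySem.Str.strip l) ≤ 1 := by omega
        simp only [pvBk, if_pos h, hb, decide_false, Bool.false_eq_true, if_false]
        rw [ih (s + 1), pvSh_shift]
      · have hb : PySem.Str.len (PySem.Str.strip l) ≤ 1 := by omega
        simp only [pvBk, if_neg h, hb, decide_true, if_true, List.map_cons]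
        rw [ih (s + 1), pvSh_cons, pvSh_shift]
        simp

-- the slice of an exactly-placed middle segment
theorem pvSlice_middle (d a r : List String) :
    PySem.List.slice (d ++ a ++ r) (some (d.length : Int)) (some ((d.length : Int) + (a.length : Int)))
    = a := by
  rw [show ((d.length : Int) + (a.length : Int)) = ((d.length + a.length : Nat) : Int) by push_cast; ring]
  rw [PySem.List.slice_natCast]
  rw [List.append_assoc, List.drop_left]
  simp

theorem pvGroups_char (ls : List String) :
    ∀ (done acc : List String) (c o : Int),
    c = done.length → o = (done.length : Int) + (acc.length : Int) →
    (List.zip ((c - 1) :: pvSh o (pvBk ls)) (pvSh o (pvBk ls))).map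
      (fun p => PySem.List.slice (done ++ acc ++ ls) (some (p.1 + 1)) (some p.2))
    = pvRuns acc ls := by
  induction ls with
  | nil => intro done acc c o _ _; simp [pvBk, pvSh_nil, pvRuns]
  | cons l ls ih =>
      intro done acc c o hc ho
      by_cases h : 1 < PySem.Str.len (PySem.Str.strip l)
      · -- content line: fold l into acc
        simp only [pvBk, pvRuns, if_pos h]
        rw [pvSh_shift]
        have H := ih done (acc ++ [l]) c (o + 1) hc (by simp [ho]; ring)
        simp only [List.append_assoc, List.singleton_append] at H ⊢
        exact H
      · -- break line: emit acc, continue after it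
        simp only [pvBk, pvRuns, if_neg h]
        rw [pvSh_cons, pvSh_shift]
        simp only [Nat.cast_zero, zero_add, List.zip_cons_cons, List.map_cons]
        congr 1
        · rw [show c - 1 + 1 = c from by ring, hc, ho]
          exact pvSlice_middle done acc (l :: ls)
        · have H := ih (done ++ acc ++ [l]) [] (o + 1) (o + 1)
            (by simp [ho]; ring) (by simp [ho]; ring)
          rw [show o + 1 - 1 = o from by ring] at H
          simp only [List.append_nil, List.append_assoc, List.singleton_append] at H ⊢
          exact H

theorem split_tags_and_tokens_eq (input : List String) :
    split_tags_and_tokens input = split_tags_and_tokens_alt input := by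
  simp only [split_tags_and_tokens, split_tags_and_tokens_alt]
  have hA := pvFoldA_char input [] [] []
  simp only [List.map_nil] at hA
  rw [hA, pvBreaks_char input 0]
  have hG := pvGroups_char input [] [] 0 0 (by simp) (by simp)
  rw [show (-1 : Int) = (0 : Int) - 1 from by ring]
  simp only [List.nil_append] at hG
  rw [hG]
  simp

-- ===== VERDICT (by name: the statement is the Claim_ definition above) =====
theorem split_tags_and_tokens_spec : Claim_equal_split_tags_and_tokens := by
  intro input _
  unfold Spec_split_tags_and_tokens
  exact split_tags_and_tokens_eq input
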